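-- pv_equiv track=rewrite | github.com/lauraguzeljblatnik/2048 | 2048.py | stisni_dol
-- ===== SOURCE A (Python) =====
-- def stisni_vrstico_levo(A):
-- #vse elemente v vrsrici stisne v levo
--     B = []
--     for i in range(len(A)):
--         if A[i] != 0:
--             B += [A[i]]
--     if B == []:
--         B = B
--     elif len(B) == 1:
--         B = B
--     elif B[0] != B[1]:
--         B = [B[0]] + stisni_vrstico_levo(B[1:])
--     elif B[0] == B[1]:
--         B = [2*B[0]] + stisni_vrstico_levo(B[2:])
--     nicle = len(A) - len(B)
--     return B + nicle*[0]
--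
-- def stisni_vrstico_desno(A):
-- #vse elemente v vrsrici stisne v desno
--     B = stisni_vrstico_levo(A[::-1])
--     return B[::-1]
--
-- def stisni_dol(A):
--     for j in range(0,4):
--         vrstica = []
--         for i in range(4):
--             vrstica.append(A[i][j])
--         B = stisni_vrstico_desno(vrstica)
--         for i in range (4):
--             A[i][j] = B[i]
--     return (A)
-- ===== SOURCE B (Python) =====
-- def stisni_dol(A):
--     # Iterative column merge: filter zeros once, scan bottom-up merging equal
--     # neighbours, pad zeros on top; mutates A in place like the original.
--     for j in range(4):
--         col = [A[i][j] for i in range(4)]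
--         nz = [x for x in col if x != 0]
--         merged = []
--         i = len(nz) - 1
--         while i >= 0:
--             if i > 0 and nz[i] == nz[i - 1]:
--                 merged.append(2 * nz[i])
--                 i -= 2
--             else:
--                 merged.append(nz[i])
--                 i -= 1
--         merged.reverse()
--         res = [0] * (4 - len(merged)) + merged
--         for i in range(4):
--             A[i][j] = res[i]
--     return A
-- ===== Notes on version B (the rewrite author's own statement) =====
-- stated objective: simpler
-- what changed: Replaces the recursive filter-and-pad merge helper (which refilters and re-pads at every recursion level, twice reversing per column) with a single iterative bottom-up scan over the once-filtered column, padded with zeros once.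
import Mathlib
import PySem

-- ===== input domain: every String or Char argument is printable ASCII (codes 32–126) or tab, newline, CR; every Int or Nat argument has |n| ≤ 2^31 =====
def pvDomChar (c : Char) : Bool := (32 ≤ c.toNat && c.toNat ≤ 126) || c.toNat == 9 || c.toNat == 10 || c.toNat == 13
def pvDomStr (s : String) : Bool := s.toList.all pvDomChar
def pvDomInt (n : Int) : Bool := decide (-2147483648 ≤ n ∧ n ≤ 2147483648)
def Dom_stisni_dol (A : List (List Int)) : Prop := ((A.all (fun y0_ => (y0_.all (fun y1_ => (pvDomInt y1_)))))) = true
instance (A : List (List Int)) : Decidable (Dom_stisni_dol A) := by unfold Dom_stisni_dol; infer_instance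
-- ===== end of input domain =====

-- B replaces the recursive refilter-and-pad merge helper with one iterative
-- bottom-up scan over the once-filtered column (objective: simpler).
-- Both Pythons mutate the argument board in place; the equivalence proved here
-- is about the RETURN value (B performs the same in-place mutation as A).


-- ===== PORT A =====
-- Python: return B + nicle*[0] with nicle = len(A) - len(B)
def pyPad (A : List Int) (B : List Int) : List Int :=
  B ++ List.replicate (A.length - B.length) 0

def stisni_vrstico_levo (A : List Int) : List Int :=
  match h : A.filter (fun x => x != 0) with
  | [] => pyPad A []
  | [b] => pyPad A [b]
  | b0 :: b1 :: rest =>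
    if b0 ≠ b1 then pyPad A (b0 :: stisni_vrstico_levo (b1 :: rest))
    else pyPad A (2 * b0 :: stisni_vrstico_levo rest)
termination_by A.length
decreasing_by
  all_goals
    have hle := List.length_filter_le (fun x => x != 0) A
    rw [h] at hle; simp at hle ⊢; omega

def stisni_vrstico_desno (A : List Int) : List Int :=
  (stisni_vrstico_levo A.reverse).reverse

def stisni_dol (A : List (List Int)) : List (List Int) :=
  (List.range 4).foldl (fun Acc j =>
    let vrstica := (List.range 4).map (fun i => (Acc.getD i []).getD j 0)
    let B := stisni_vrstico_desno vrstica
    (List.range 4).foldl (fun Acc2 i =>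
      Acc2.set i ((Acc2.getD i []).set j (B.getD i 0))) Acc) A

-- ===== PORT B =====
-- the while loop of Source B, read off the reversed non-zero column
def scanDown : List Int → List Int
  | [] => []
  | [x] => [x]
  | x :: y :: rest => if x = y then 2 * x :: scanDown rest else x :: scanDown (y :: rest)

def stisni_dol_alt (A : List (List Int)) : List (List Int) :=
  (List.range 4).foldl (fun Acc j =>
    let col := (List.range 4).map (fun i => (Acc.getD i []).getD j 0)
    let nz := col.filter (fun x => x != 0)
    let merged := (scanDown nz.reverse).reverse
    let res := List.replicate (4 - merged.length) 0 ++ merged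
    (List.range 4).foldl (fun Acc2 i =>
      Acc2.set i ((Acc2.getD i []).set j (res.getD i 0))) Acc) A

-- ===== PRECONDITION & SPEC =====
-- Pre_: Python A raises IndexError unless the board has at least 4 rows and
-- each of the first 4 rows has at least 4 entries; exactly there A returns.
def Pre_stisni_dol (A : List (List Int)) : Prop :=
  4 ≤ A.length ∧ ∀ r ∈ A.take 4, 4 ≤ r.length
instance (A : List (List Int)) : Decidable (Pre_stisni_dol A) := by unfold Pre_stisni_dol; infer_instance

def pvWitness_stisni_dol : List (List Int) :=
  [[2, 0, 2, 4], [2, 2, 0, 4], [0, 2, 2, 0], [4, 0, 2, 4]]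

def Spec_stisni_dol (A : List (List Int)) (out : List (List Int)) : Prop := out = stisni_dol_alt A
instance (A : List (List Int)) (out : List (List Int)) : Decidable (Spec_stisni_dol A out) := by unfold Spec_stisni_dol; infer_instance

-- ===== CLAIM (what is proved, stated in full; the proofs are below) =====
def Claim_equal_stisni_dol : Prop := ∀ (A : List (List Int)), Dom_stisni_dol A → Pre_stisni_dol A → Spec_stisni_dol A (stisni_dol A)

-- ===== LEMMAS AND PROOFS =====

theorem scanDown_length_le : ∀ l : List Int, (scanDown l).length ≤ l.length := by
  intro l
  induction l using scanDown.induct with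
  | case1 => simp [scanDown]
  | case2 => simp [scanDown]
  | case3 y rest ih => simp [scanDown] at ih ⊢; omega
  | case4 x y rest hne ih => simp [scanDown, hne] at ih ⊢; omega

-- characterisation of A's recursive helper: merge the filtered list once, pad once
theorem svl_eq (A : List Int) :
    stisni_vrstico_levo A =
      scanDown (A.filter (fun x => x != 0)) ++
        List.replicate (A.length - (scanDown (A.filter (fun x => x != 0))).length) 0 := by
  induction A using stisni_vrstico_levo.induct with
  | case1 A h =>
    rw [h]
    unfold stisni_vrstico_levo
    split <;> simp_all [pyPad, scanDown]
  | case2 A b h =>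
    rw [h]
    unfold stisni_vrstico_levo
    split <;> simp_all [pyPad, scanDown]
  | case3 A b0 b1 rest h hne ih =>
    have hall : ∀ x ∈ b1 :: rest, (x != 0) = true := by
      intro x hx
      have hm : x ∈ A.filter (fun x => x != 0) := by
        rw [h]; exact List.mem_cons_of_mem _ hx
      exact (List.mem_filter.mp hm).2
    have hsub : (b1 :: rest).filter (fun x => x != 0) = b1 :: rest :=
      List.filter_eq_self.mpr hall
    have hlen : (b0 :: b1 :: rest).length ≤ A.length := by
      have := List.length_filter_le (fun x => x != 0) A; rw [h] at this; exact this
    have hmle : (scanDown (b1 :: rest)).length ≤ (b1 :: rest).length :=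
      scanDown_length_le _
    rw [hsub] at ih
    rw [h]
    unfold stisni_vrstico_levo
    split
    · rename_i h'; rw [h] at h'; simp at h'
    · rename_i b h'; rw [h] at h'; simp at h'
    · rename_i b0' b1' rest' h'
      rw [h] at h'; injection h' with e1 e2; injection e2 with e2 e3; subst e1; subst e2; subst e3
      rw [if_pos hne, pyPad]
      simp only [scanDown]; rw [if_neg hne]
      rw [ih]
      simp at hlen hmle ⊢
      omega
  | case4 A b0 b1 rest h hne ih =>
    have heq : b0 = b1 := by by_contra hc; exact hne hc
    have hall : ∀ x ∈ rest, (x != 0) = true := by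
      intro x hx
      have hm : x ∈ A.filter (fun x => x != 0) := by
        rw [h]; exact List.mem_cons_of_mem _ (List.mem_cons_of_mem _ hx)
      exact (List.mem_filter.mp hm).2
    have hsub : rest.filter (fun x => x != 0) = rest :=
      List.filter_eq_self.mpr hall
    have hlen : (b0 :: b1 :: rest).length ≤ A.length := by
      have := List.length_filter_le (fun x => x != 0) A; rw [h] at this; exact this
    have hmle : (scanDown rest).length ≤ rest.length := scanDown_length_le _
    rw [hsub] at ih
    rw [h]
    unfold stisni_vrstico_levo
    split
    · rename_i h'; rw [h] at h'; simp at h'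
    · rename_i b h'; rw [h] at h'; simp at h'
    · rename_i b0' b1' rest' h'
      rw [h] at h'; injection h' with e1 e2; injection e2 with e2 e3; subst e1; subst e2; subst e3
      rw [if_neg hne, pyPad]
      simp only [scanDown]; rw [if_pos heq]
      rw [ih]
      simp at hlen hmle ⊢
      omega

-- per-column agreement: A's desno-merge equals B's filter/scan/pad computation
theorem col_eq (col : List Int) (hlen : col.length = 4) :
    stisni_vrstico_desno col =
      List.replicate (4 - ((scanDown ((col.filter (fun x => x != 0)).reverse)).reverse).length) 0 ++
        (scanDown ((col.filter (fun x => x != 0)).reverse)).reverse := by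
  rw [stisni_vrstico_desno, svl_eq]
  rw [List.filter_reverse]
  rw [List.reverse_append, List.reverse_replicate, List.length_reverse, hlen]
  simp

theorem stisni_dol_eq_alt (A : List (List Int)) : stisni_dol A = stisni_dol_alt A := by
  unfold stisni_dol stisni_dol_alt
  apply List.foldl_ext
  intro Acc j _
  have hc : ((List.range 4).map (fun i => (Acc.getD i []).getD j 0)).length = 4 := by simp
  show (List.range 4).foldl (fun Acc2 i =>
      Acc2.set i ((Acc2.getD i []).set j
        ((stisni_vrstico_desno ((List.range 4).map (fun i => (Acc.getD i []).getD j 0))).getD i 0))) Acc =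
    (List.range 4).foldl (fun Acc2 i =>
      Acc2.set i ((Acc2.getD i []).set j
        ((List.replicate (4 - ((scanDown ((((List.range 4).map (fun i => (Acc.getD i []).getD j 0)).filter (fun x => x != 0)).reverse)).reverse).length) 0 ++
          (scanDown ((((List.range 4).map (fun i => (Acc.getD i []).getD j 0)).filter (fun x => x != 0)).reverse)).reverse).getD i 0))) Acc
  rw [col_eq _ hc]

-- ===== VERDICT (by name: the statement is the Claim_ definition above) =====
theorem stisni_dol_spec : Claim_equal_stisni_dol := by
  intro A _ _
  unfold Spec_stisni_dol
  exact stisni_dol_eq_alt A
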